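-- pv_equiv track=rewrite | github.com/CHAI-UK/EducAgent | src/agents/passive/text_normalization.py | decode_overescaped_text
-- ===== SOURCE A (Python) =====
-- _ESCAPED_MARKDOWN_TOKENS = ("\\n", "\\r", "\\t", '\\"', "\\\\")
--
-- def decode_overescaped_text(value: str) -> str:
--     """Decode strings that were JSON-escaped one extra time by the model.
--
--     The passive content generator expects markdown text, but some model
--     responses encode section bodies as a JSON string inside the JSON payload.
--     That leaves literals like ``\\n``, ``\\"`` and doubled LaTeX backslashes in
--     the parsed result. We only decode when the string looks suspicious and the
--     decoded output clearly reduces those escape markers.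
--     """
--     if not value or not any(token in value for token in _ESCAPED_MARKDOWN_TOKENS):
--         return value
--
--     actual_newlines = value.count("\n")
--     literal_newlines = value.count("\\n")
--     if actual_newlines and literal_newlines <= actual_newlines:
--         return value
--
--     decoded_chars: list[str] = []
--     changed = False
--     i = 0
--     while i < len(value):
--         ch = value[i]
--         if ch != "\\" or i + 1 >= len(value):
--             decoded_chars.append(ch)
--             i += 1
--             continue
--
--         next_ch = value[i + 1]
--         if next_ch == "n":
--             decoded_chars.append("\n")
--             changed = True
--             i += 2
--             continue
--         if next_ch == "r":
--             decoded_chars.append("\r")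
--             changed = True
--             i += 2
--             continue
--         if next_ch == "t":
--             decoded_chars.append("\t")
--             changed = True
--             i += 2
--             continue
--         if next_ch == "b":
--             decoded_chars.append("\b")
--             changed = True
--             i += 2
--             continue
--         if next_ch == "f":
--             decoded_chars.append("\f")
--             changed = True
--             i += 2
--             continue
--         if next_ch in {'"', "\\", "/"}:
--             decoded_chars.append(next_ch)
--             changed = True
--             i += 2
--             continue
--
--         decoded_chars.append(ch)
--         i += 1
--
--     if not changed:
--         return value
--
--     decoded = "".join(decoded_chars)
--     escape_reduced = any(
--         decoded.count(token) < value.count(token) for token in _ESCAPED_MARKDOWN_TOKENS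
--     )
--     formatting_recovered = (
--         decoded.count("\n") > value.count("\n")
--         or decoded.count("\t") > value.count("\t")
--         or decoded.count('"') > value.count('"')
--     )
--
--     return decoded if escape_reduced or formatting_recovered else value
-- ===== SOURCE B (Python) =====
-- # B: split-once-on-backslash decoder — processes the segments between backslashes
-- # instead of A's index-based per-character while loop; "changed" becomes decoded != value.
-- _ESCAPED_MARKDOWN_TOKENS = ("\\n", "\\r", "\\t", '\\"', "\\\\")
-- _DECODE_MAP = {"n": "\n", "r": "\r", "t": "\t", "b": "\b", "f": "\f", '"': '"', "/": "/"}
--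
--
-- def decode_overescaped_text(value: str) -> str:
--     if not value or not any(token in value for token in _ESCAPED_MARKDOWN_TOKENS):
--         return value
--
--     actual_newlines = value.count("\n")
--     if actual_newlines and value.count("\\n") <= actual_newlines:
--         return value
--
--     segments = value.split("\\")
--     pieces = [segments[0]]
--     i = 1
--     n = len(segments)
--     while i < n:
--         seg = segments[i]
--         if seg == "":
--             if i + 1 < n:
--                 # "\\\\": escaped backslash; the next segment is plain text
--                 pieces.append("\\" + segments[i + 1])
--                 i += 2
--             else:
--                 # trailing lone backslash
--                 pieces.append("\\")
--                 i += 1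
--         elif seg[0] in _DECODE_MAP:
--             pieces.append(_DECODE_MAP[seg[0]] + seg[1:])
--             i += 1
--         else:
--             # unrecognized escape: keep the backslash and the segment
--             pieces.append("\\" + seg)
--             i += 1
--
--     decoded = "".join(pieces)
--     if decoded == value:
--         return value
--
--     escape_reduced = any(
--         decoded.count(token) < value.count(token) for token in _ESCAPED_MARKDOWN_TOKENS
--     )
--     formatting_recovered = (
--         decoded.count("\n") > value.count("\n")
--         or decoded.count("\t") > value.count("\t")
--         or decoded.count('"') > value.count('"')
--     )
--
--     return decoded if escape_reduced or formatting_recovered else value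
-- ===== Notes on version B (the rewrite author's own statement) =====
-- stated objective: alternative
-- what changed: The index-based per-character while-loop decoder (with its 'changed' flag) is replaced by splitting the string once on backslash and processing the resulting segments (mapping each segment's first character through an escape dict), with acceptance decided by decoded != value.
import Mathlib
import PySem

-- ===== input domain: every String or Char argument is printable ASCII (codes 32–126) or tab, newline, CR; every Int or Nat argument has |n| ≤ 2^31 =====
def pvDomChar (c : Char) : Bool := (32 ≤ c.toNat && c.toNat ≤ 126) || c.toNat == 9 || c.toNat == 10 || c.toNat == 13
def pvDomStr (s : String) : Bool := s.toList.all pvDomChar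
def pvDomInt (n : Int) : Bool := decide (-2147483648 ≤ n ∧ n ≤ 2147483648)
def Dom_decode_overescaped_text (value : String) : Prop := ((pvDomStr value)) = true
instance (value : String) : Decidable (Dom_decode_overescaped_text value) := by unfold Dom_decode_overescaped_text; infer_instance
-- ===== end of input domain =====

-- B replaces A's index-based per-character while loop by a single split on '\' plus a
-- scan over the segments (objective: alternative decomposition, same cost); return values agree.

-- ===== PORT A =====
-- _ESCAPED_MARKDOWN_TOKENS = ("\\n", "\\r", "\\t", '\\"', "\\\\")
def pvTokens : List (List Char) := [['\\', 'n'], ['\\', 'r'], ['\\', 't'], ['\\', '"'], ['\\', '\\']]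

-- A's while loop: returns (decoded_chars, changed)
def pvDecodeA : List Char → List Char × Bool
  | [] => ([], false)
  | [c] => ([c], false)          -- "ch != '\\' or i + 1 >= len(value)" with i = len - 1
  | c :: d :: rest =>
    if c ≠ '\\' then
      let r := pvDecodeA (d :: rest); (c :: r.1, r.2)
    else if d = 'n' then let r := pvDecodeA rest; ('\n' :: r.1, true)
    else if d = 'r' then let r := pvDecodeA rest; ('\x0d' :: r.1, true)
    else if d = 't' then let r := pvDecodeA rest; ('\t' :: r.1, true)
    else if d = 'b' then let r := pvDecodeA rest; ('\x08' :: r.1, true)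
    else if d = 'f' then let r := pvDecodeA rest; ('\x0c' :: r.1, true)
    else if d = '"' ∨ d = '\\' ∨ d = '/' then let r := pvDecodeA rest; (d :: r.1, true)
    else
      let r := pvDecodeA (d :: rest); (c :: r.1, r.2)

def decode_overescaped_text (value : String) : String :=
  let cs := value.toList
  if cs = [] ∨ (pvTokens.any fun t => PySem.Chars.isIn t cs) = false then value
  else if PySem.Chars.count cs ['\n'] ≠ 0 ∧
          PySem.Chars.count cs ['\\', 'n'] ≤ PySem.Chars.count cs ['\n'] then value
  else
    let r := pvDecodeA cs
    if r.2 = false then value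
    else
      let decoded := r.1
      if (pvTokens.any fun t => PySem.Chars.count decoded t < PySem.Chars.count cs t) = true ∨
         PySem.Chars.count cs ['\n'] < PySem.Chars.count decoded ['\n'] ∨
         PySem.Chars.count cs ['\t'] < PySem.Chars.count decoded ['\t'] ∨
         PySem.Chars.count cs ['"'] < PySem.Chars.count decoded ['"'] then
        String.mk decoded
      else value

-- ===== PORT B =====
-- _DECODE_MAP lookup: some = the replacement, none = key absent
def pvMapB (c : Char) : Option Char :=
  if c = 'n' then some '\n'
  else if c = 'r' then some '\x0d'
  else if c = 't' then some '\t'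
  else if c = 'b' then some '\x08'
  else if c = 'f' then some '\x0c'
  else if c = '"' then some '"'
  else if c = '/' then some '/'
  else none

-- B's while loop over segments[1:]: each segment was preceded by one '\'
def pvJoinB : List (List Char) → List Char
  | [] => []
  | [] :: [] => ['\\']                                   -- trailing lone backslash
  | [] :: next :: rest => '\\' :: (next ++ pvJoinB rest) -- "\\\\": next segment is plain text
  | (c :: tl) :: rest =>
    match pvMapB c with
    | some repl => repl :: (tl ++ pvJoinB rest)
    | none => '\\' :: c :: (tl ++ pvJoinB rest)          -- unrecognized escape

-- value.split("\\") then join the processed pieces; List.splitOn is exact for Python's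
-- str.split with a one-character separator (keeps empty parts, [''] on '')
def pvDecB (cs : List Char) : List Char :=
  match cs.splitOn '\\' with
  | [] => []
  | s0 :: segs => s0 ++ pvJoinB segs

def decode_overescaped_text_alt (value : String) : String :=
  let cs := value.toList
  if cs = [] ∨ (pvTokens.any fun t => PySem.Chars.isIn t cs) = false then value
  else if PySem.Chars.count cs ['\n'] ≠ 0 ∧
          PySem.Chars.count cs ['\\', 'n'] ≤ PySem.Chars.count cs ['\n'] then value
  else
    let decoded := pvDecB cs
    if decoded = cs then value
    else
      if (pvTokens.any fun t => PySem.Chars.count decoded t < PySem.Chars.count cs t) = true ∨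
         PySem.Chars.count cs ['\n'] < PySem.Chars.count decoded ['\n'] ∨
         PySem.Chars.count cs ['\t'] < PySem.Chars.count decoded ['\t'] ∨
         PySem.Chars.count cs ['"'] < PySem.Chars.count decoded ['"'] then
        String.mk decoded
      else value

-- ===== PRECONDITION & SPEC =====
def Spec_decode_overescaped_text (value : String) (out : String) : Prop := out = decode_overescaped_text_alt value
instance (value : String) (out : String) : Decidable (Spec_decode_overescaped_text value out) := by unfold Spec_decode_overescaped_text; infer_instance

-- ===== CLAIM (what is proved, stated in full; the proofs are below) =====
def Claim_equal_decode_overescaped_text : Prop := ∀ (value : String), Dom_decode_overescaped_text value → Spec_decode_overescaped_text value (decode_overescaped_text value)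

-- ===== LEMMAS AND PROOFS =====

lemma splitOn_bs_ne_nil (l : List Char) : l.splitOn '\\' ≠ [] := by
  simp [List.splitOn, List.splitOnP_ne_nil]

lemma splitOn_bs_dest (l : List Char) :
    ∃ s0 segs, l.splitOn '\\' = s0 :: segs ∧ pvDecB l = s0 ++ pvJoinB segs := by
  cases hE : l.splitOn '\\' with
  | nil => exact absurd hE (splitOn_bs_ne_nil l)
  | cons a b => exact ⟨a, b, rfl, by unfold pvDecB; rw [hE]⟩

lemma pvDecB_nil : pvDecB [] = [] := rfl

lemma pvDecB_cons_ne (c : Char) (l : List Char) (h : ¬ c = '\\') :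
    pvDecB (c :: l) = c :: pvDecB l := by
  obtain ⟨s0, segs, hE, hD⟩ := splitOn_bs_dest l
  have hsp : (c :: l).splitOn '\\' = (c :: s0) :: segs := by
    simp [List.splitOn, List.splitOnP_cons, h] at hE ⊢
    rw [hE]; rfl
  unfold pvDecB
  rw [hsp, hE]
  simp

lemma splitOn_cons_bs (l : List Char) :
    ('\\' :: l).splitOn '\\' = [] :: l.splitOn '\\' := by
  simp [List.splitOn, List.splitOnP_cons]

lemma pvDecB_cons_bs (l : List Char) :
    pvDecB ('\\' :: l) = pvJoinB (l.splitOn '\\') := by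
  unfold pvDecB
  rw [splitOn_cons_bs]
  obtain ⟨s0, segs, hE, _⟩ := splitOn_bs_dest l
  rw [hE]
  simp

lemma pvDecB_esc (d : Char) (rest : List Char) (hd : ¬ d = '\\') :
    pvDecB ('\\' :: d :: rest) =
      match pvMapB d with
      | some repl => repl :: pvDecB rest
      | none => '\\' :: d :: pvDecB rest := by
  rw [pvDecB_cons_bs]
  obtain ⟨s0, segs, hE, hD⟩ := splitOn_bs_dest rest
  have hsp : (d :: rest).splitOn '\\' = (d :: s0) :: segs := by
    simp [List.splitOn, List.splitOnP_cons, hd] at hE ⊢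
    rw [hE]; rfl
  rw [hsp, hD]
  cases hm : pvMapB d <;> simp [pvJoinB, hm]

lemma pvDecB_bsbs (rest : List Char) :
    pvDecB ('\\' :: '\\' :: rest) = '\\' :: pvDecB rest := by
  rw [pvDecB_cons_bs, splitOn_cons_bs]
  obtain ⟨s0, segs, hE, hD⟩ := splitOn_bs_dest rest
  rw [hE, hD]; rfl

-- the decoded characters of the two ports coincide
lemma decodeA_fst_eq_pvDecB (l : List Char) : (pvDecodeA l).1 = pvDecB l := by
  induction l using pvDecodeA.induct with
  | case1 => simp [pvDecodeA, pvDecB_nil]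
  | case2 c =>
    by_cases h : c = '\\'
    · subst h; decide
    · simp [pvDecodeA, pvDecB_cons_ne c [] h, pvDecB_nil]
  | case3 c d rest h ih =>
    simp only [pvDecodeA, if_pos h]
    rw [ih, pvDecB_cons_ne c (d :: rest) (by simpa using h)]
  | case4 c rest hc ih =>
    have hc' : c = '\\' := not_not.mp hc
    subst hc'
    simp [pvDecodeA, ih, pvDecB_esc 'n' rest (by decide), pvMapB]
  | case5 c rest hc h1 ih =>
    have hc' : c = '\\' := not_not.mp hc
    subst hc'
    simp [pvDecodeA, ih, pvDecB_esc 'r' rest (by decide), pvMapB]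
  | case6 c rest hc h1 h2 ih =>
    have hc' : c = '\\' := not_not.mp hc
    subst hc'
    simp [pvDecodeA, ih, pvDecB_esc 't' rest (by decide), pvMapB]
  | case7 c rest hc h1 h2 h3 ih =>
    have hc' : c = '\\' := not_not.mp hc
    subst hc'
    simp [pvDecodeA, ih, pvDecB_esc 'b' rest (by decide), pvMapB]
  | case8 c rest hc h1 h2 h3 h4 ih =>
    have hc' : c = '\\' := not_not.mp hc
    subst hc'
    simp [pvDecodeA, ih, pvDecB_esc 'f' rest (by decide), pvMapB]
  | case9 c d rest hc h1 h2 h3 h4 h5 hor ih =>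
    have hc' : c = '\\' := not_not.mp hc
    subst hc'
    rcases hor with h | h | h
    · subst h; simp [pvDecodeA, ih, pvDecB_esc '"' rest (by decide), pvMapB]
    · subst h; simp [pvDecodeA, ih, pvDecB_bsbs]
    · subst h; simp [pvDecodeA, ih, pvDecB_esc '/' rest (by decide), pvMapB]
  | case10 c d rest hc h1 h2 h3 h4 h5 hnor ih =>
    have hc' : c = '\\' := not_not.mp hc
    subst hc'
    have hd : ¬ d = '\\' := by intro h; exact hnor (Or.inr (Or.inl h))
    have hq : ¬ d = '"' := by intro h; exact hnor (Or.inl h)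
    have hs : ¬ d = '/' := by intro h; exact hnor (Or.inr (Or.inr h))
    have hm : pvMapB d = none := by simp [pvMapB, h1, h2, h3, h4, h5, hq, hs]
    have hB : pvDecB ('\\' :: d :: rest) = '\\' :: d :: pvDecB rest := by
      rw [pvDecB_esc d rest hd]; simp [hm]
    simp [pvDecodeA, h1, h2, h3, h4, h5, hnor, hB, ih, pvDecB_cons_ne d rest hd]

lemma decodeA_fst_length_le (l : List Char) : (pvDecodeA l).1.length ≤ l.length := by
  induction l using pvDecodeA.induct <;> simp_all [pvDecodeA] <;> omega

-- changed = true exactly when the decoded characters differ from the input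
lemma decodeA_snd_iff (l : List Char) : (pvDecodeA l).2 = true ↔ (pvDecodeA l).1 ≠ l := by
  induction l using pvDecodeA.induct with
  | case1 => simp [pvDecodeA]
  | case2 c => simp [pvDecodeA]
  | case3 c d rest h ih =>
    simp only [pvDecodeA, if_pos h]
    simpa using ih
  | case4 c rest hc ih =>
    obtain rfl : c = '\\' := not_not.mp hc
    simp [pvDecodeA]
  | case5 c rest hc h1 ih =>
    obtain rfl : c = '\\' := not_not.mp hc
    simp [pvDecodeA]
  | case6 c rest hc h1 h2 ih =>
    obtain rfl : c = '\\' := not_not.mp hc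
    simp [pvDecodeA]
  | case7 c rest hc h1 h2 h3 ih =>
    obtain rfl : c = '\\' := not_not.mp hc
    simp [pvDecodeA]
  | case8 c rest hc h1 h2 h3 h4 ih =>
    obtain rfl : c = '\\' := not_not.mp hc
    simp [pvDecodeA]
  | case9 c d rest hc h1 h2 h3 h4 h5 hor ih =>
    obtain rfl : c = '\\' := not_not.mp hc
    have hlen := decodeA_fst_length_le rest
    have hne : (d :: (pvDecodeA rest).1) ≠ '\\' :: d :: rest := by
      intro hEq
      have := congrArg List.length hEq
      simp at this
      omega
    simp [pvDecodeA, h1, h2, h3, h4, h5, hor, hne]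
  | case10 c d rest hc h1 h2 h3 h4 h5 hnor ih =>
    obtain rfl : c = '\\' := not_not.mp hc
    simp [pvDecodeA, h1, h2, h3, h4, h5, hnor, ih]

-- ===== VERDICT (by name: the statement is the Claim_ definition above) =====
theorem decode_overescaped_text_spec : Claim_equal_decode_overescaped_text := by
  unfold Claim_equal_decode_overescaped_text
  intro value hdom
  unfold Spec_decode_overescaped_text
  have hfst := decodeA_fst_eq_pvDecB value.toList
  have hiff := decodeA_snd_iff value.toList
  rw [hfst] at hiff
  simp only [decode_overescaped_text, decode_overescaped_text_alt, hfst]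
  split_ifs <;> first | rfl | simp_all
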